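-- pv_equiv track=rewrite | github.com/22adityakumar/GFG | Difficulty: Basic/Even occurring elements/even-occurring-elements.py | findEvenOccurrences
-- ===== SOURCE A (Python) =====
-- def findEvenOccurrences(arr):
--     # Initialize a dictionary to count occurrences
--     mp = {}
--     arr1 = []
--     for i in range(len(arr)):
--         if arr[i] in mp:
--             mp[arr[i]] += 1
--         else:
--             mp[arr[i]] = 1
--     for x in mp:
--         if mp[x] % 2 == 0:
--             arr1.append(x)
--     return arr1 if arr1 else [-1]
-- ===== SOURCE B (Python) =====
-- def findEvenOccurrences(arr):
--     # one pass: keep first-appearance order and a parity ("odd so far") set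
--     order = []
--     seen = set()
--     odd = set()
--     for x in arr:
--         if x not in seen:
--             seen.add(x)
--             order.append(x)
--         if x in odd:
--             odd.discard(x)
--         else:
--             odd.add(x)
--     res = [x for x in order if x not in odd]
--     return res if res else [-1]
-- ===== Notes on version B (the rewrite author's own statement) =====
-- stated objective: alternative
-- what changed: Replaces A's count-dictionary plus second pass over the dict (testing each count mod 2) by a single pass maintaining a parity 'odd' set toggled per element and a first-appearance order list, then filtering the order list by absence from the odd set.
import Mathlib
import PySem

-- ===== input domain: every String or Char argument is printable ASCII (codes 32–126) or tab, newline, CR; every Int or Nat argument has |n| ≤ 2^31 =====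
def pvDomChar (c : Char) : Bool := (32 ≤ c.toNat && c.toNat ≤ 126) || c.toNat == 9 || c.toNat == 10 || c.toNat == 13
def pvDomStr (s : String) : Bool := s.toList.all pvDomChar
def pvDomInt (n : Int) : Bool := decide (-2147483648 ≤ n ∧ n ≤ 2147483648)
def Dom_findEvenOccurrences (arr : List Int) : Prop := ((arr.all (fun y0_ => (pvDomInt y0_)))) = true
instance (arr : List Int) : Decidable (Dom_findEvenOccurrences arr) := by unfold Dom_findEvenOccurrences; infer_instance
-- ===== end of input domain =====

-- B replaces A's count dictionary + second pass over the dict by a one-pass parity set with a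
-- first-appearance order list (alternative decomposition, same expected cost).

-- ===== PORT A =====
def findEvenOccurrences (arr : List Int) : List Int :=
  let mp := (PySem.List.pyRange 0 (arr.length : Int) 1).foldl
      (fun d i =>
        let x := PySem.List.pyGetD arr i 0
        if d.contains x then d.modify x 0 (· + 1) else d.insert x 1)
      (PySem.Dict.empty : PySem.Dict Int Int)
  let arr1 := mp.keys.foldl
      (fun acc x => if mp.getD x 0 % 2 == 0 then acc ++ [x] else acc) []
  if arr1.isEmpty then [-1] else arr1

-- ===== PORT B =====
-- one loop step of Source B: record first appearance in the order list/seen set, toggle parity in odd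
def pvStepB (s : List Int × PySem.Set Int × PySem.Set Int) (x : Int) :
    List Int × PySem.Set Int × PySem.Set Int :=
  ((if s.2.1.contains x then s.1 else s.1 ++ [x]),
   (if s.2.1.contains x then s.2.1 else s.2.1.add x),
   (if s.2.2.contains x then s.2.2.discard x else s.2.2.add x))

def findEvenOccurrences_alt (arr : List Int) : List Int :=
  let s := arr.foldl pvStepB ([], PySem.Set.empty, PySem.Set.empty)
  let res := s.1.filter (fun x => !s.2.2.contains x)
  if res.isEmpty then [-1] else res

-- ===== PRECONDITION & SPEC =====
def Spec_findEvenOccurrences (arr : List Int) (out : List Int) : Prop := out = findEvenOccurrences_alt arr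
instance (arr : List Int) (out : List Int) : Decidable (Spec_findEvenOccurrences arr out) := by unfold Spec_findEvenOccurrences; infer_instance

-- ===== CLAIM (what is proved, stated in full; the proofs are below) =====
def Claim_equal_findEvenOccurrences : Prop := ∀ (arr : List Int), Dom_findEvenOccurrences arr → Spec_findEvenOccurrences arr (findEvenOccurrences arr)

-- ===== LEMMAS AND PROOFS =====

-- A's loop body is exactly Counter's update step
theorem pvStepA_eq_modify (d : PySem.Dict Int Int) (x : Int) :
    (if d.contains x then d.modify x 0 (· + 1) else d.insert x 1) = d.modify x 0 (· + 1) := by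
  by_cases h : d.contains x = true
  · simp [h]
  · have hc : d.contains x = false := by simpa using h
    simp [h, PySem.Dict.modify, PySem.Dict.getD_of_not_contains d 0 hc]

-- A's dictionary is Counter(arr)
theorem pvMp_eq_counter (arr : List Int) :
    (PySem.List.pyRange 0 (arr.length : Int) 1).foldl
      (fun d i =>
        if d.contains (PySem.List.pyGetD arr i 0) then
          d.modify (PySem.List.pyGetD arr i 0) 0 (· + 1)
        else d.insert (PySem.List.pyGetD arr i 0) 1)
      (PySem.Dict.empty : PySem.Dict Int Int) = PySem.Dict.counter arr := by
  simp only [pvStepA_eq_modify]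
  rw [PySem.List.foldl_pyRange_zero_pyGetD' arr 0
      (fun (d : PySem.Dict Int Int) x => d.modify x 0 (· + 1)) PySem.Dict.empty]
  rw [PySem.Dict.counter_eq_foldl]

-- B's loop state after the whole list: order = seen = set(arr) in first-appearance order,
-- and odd holds exactly the values with an odd count
theorem pvB_state (l : List Int) :
    (l.foldl pvStepB ([], PySem.Set.empty, PySem.Set.empty)).1 = PySem.Set.ofList l ∧
    (l.foldl pvStepB ([], PySem.Set.empty, PySem.Set.empty)).2.1 = PySem.Set.ofList l ∧
    ∀ y, y ∈ (l.foldl pvStepB ([], PySem.Set.empty, PySem.Set.empty)).2.2 ↔ l.count y % 2 = 1 := by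
  induction l using List.reverseRecOn with
  | nil => refine ⟨rfl, rfl, ?_⟩; intro y; simp [PySem.Set.empty, PySem.Set.ofList]
  | append_singleton l x ih =>
    obtain ⟨h1, h2, h3⟩ := ih
    rw [List.foldl_append, List.foldl_cons, List.foldl_nil]
    refine ⟨?_, ?_, ?_⟩
    · simp only [pvStepB, h1, h2, PySem.Set.ofList_append_singleton, PySem.Set.add]
    · simp only [pvStepB, h2, PySem.Set.ofList_append_singleton, PySem.Set.add]
      split <;> rfl
    · intro y
      simp only [pvStepB]
      by_cases hc : (l.foldl pvStepB ([], PySem.Set.empty, PySem.Set.empty)).2.2.contains x = true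
      · have hx : l.count x % 2 = 1 := (h3 x).mp ((PySem.Set.contains_iff _ _).mp hc)
        simp only [hc, if_true, PySem.Set.mem_discard, h3]
        by_cases hxy : x = y
        · subst hxy
          have hcnt : (l ++ [x]).count x = l.count x + 1 := by
            simp [List.count_append]
          rw [hcnt]
          constructor
          · rintro ⟨-, hne⟩; exact absurd rfl hne
          · intro h; exact absurd h (by omega)
        · have hcnt : (l ++ [x]).count y = l.count y := by
            simp [List.count_append, List.count_singleton, hxy]
          rw [hcnt]
          simp [h3, Ne.symm hxy]
      · have hx : ¬ l.count x % 2 = 1 := fun h => hc ((PySem.Set.contains_iff _ _).mpr ((h3 x).mpr h))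
        rw [Bool.not_eq_true] at hc
        simp only [hc, Bool.false_eq_true, if_false, PySem.Set.mem_add, h3]
        by_cases hxy : x = y
        · subst hxy
          have hcnt : (l ++ [x]).count x = l.count x + 1 := by
            simp [List.count_append]
          rw [hcnt]
          constructor
          · intro _; omega
          · intro _; right; rfl
        · have hcnt : (l ++ [x]).count y = l.count y := by
            simp [List.count_append, List.count_singleton, hxy]
          rw [hcnt]
          exact ⟨fun h => h.resolve_right (fun h' => hxy h'.symm), Or.inl⟩

-- ===== VERDICT (by name: the statement is the Claim_ definition above) =====
theorem findEvenOccurrences_spec : Claim_equal_findEvenOccurrences := by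
  intro arr _
  unfold Spec_findEvenOccurrences findEvenOccurrences findEvenOccurrences_alt
  obtain ⟨h1, _, h3⟩ := pvB_state arr
  simp only [pvMp_eq_counter arr, PySem.List.foldl_append_if, List.nil_append,
    PySem.Dict.keys_counter, h1, PySem.Dict.getD_counter, List.map_id']
  have hf : ∀ x ∈ PySem.Set.ofList arr,
      (((arr.count x : Int) % 2 == 0)) =
      (!(arr.foldl pvStepB ([], PySem.Set.empty, PySem.Set.empty)).2.2.contains x) := by
    intro x _
    by_cases hodd : arr.count x % 2 = 1
    · have hm : x ∈ (arr.foldl pvStepB ([], PySem.Set.empty, PySem.Set.empty)).2.2 :=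
        (h3 x).mpr hodd
      have hz : ¬ ((arr.count x : Int) % 2 = 0) := by omega
      simp only [PySem.Set.empty] at hm
      simp [hm, hz]
    · have hm : x ∉ (arr.foldl pvStepB ([], PySem.Set.empty, PySem.Set.empty)).2.2 :=
        fun h => hodd ((h3 x).mp h)
      have hz : (arr.count x : Int) % 2 = 0 := by omega
      simp only [PySem.Set.empty] at hm
      simp [hm, hz]
  rw [List.filter_congr hf]
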